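-- pv_equiv track=rewrite | github.com/xohanthetrader/NEA-Evolution-Simulation | charts.py | fix_data
-- ===== SOURCE A (Python) =====
-- from typing import Tuple, List, Callable, Optional
--
-- def fix_data(x : List[int],y : List[int]) -> Tuple[List[int],List[int]]:#Adjust Shape of graph to ensure straight lines
--     new_x = []
--     new_y = []
--     for i in range(len(x)):
--         new_x.append(x[i])
--         new_y.append(y[i])
--
--         if i != len(x) - 1:
--             new_x.append(x[i + 1])
--             new_y.append(y[i])
--     return new_x,new_y
-- ===== SOURCE B (Python) =====
-- from typing import Tuple, List
--
--
-- def _doubled(vals: List[int]) -> List[int]: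
--     return [v for u in vals for v in (u, u)]
--
--
-- def fix_data(x : List[int], y : List[int]) -> Tuple[List[int], List[int]]:
--     n = len(x)
--     if n == 0:
--         return [], []
--     return x[:1] + _doubled(x[1:]), _doubled(y[:n - 1]) + [y[n - 1]]
-- ===== Notes on version B (the rewrite author's own statement) =====
-- stated objective: alternative
-- what changed: Replaced the index loop with its last-iteration branch by a declarative construction from slices: x[:1] plus every later x duplicated, every y but the last duplicated plus the final y appended.
import Mathlib
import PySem

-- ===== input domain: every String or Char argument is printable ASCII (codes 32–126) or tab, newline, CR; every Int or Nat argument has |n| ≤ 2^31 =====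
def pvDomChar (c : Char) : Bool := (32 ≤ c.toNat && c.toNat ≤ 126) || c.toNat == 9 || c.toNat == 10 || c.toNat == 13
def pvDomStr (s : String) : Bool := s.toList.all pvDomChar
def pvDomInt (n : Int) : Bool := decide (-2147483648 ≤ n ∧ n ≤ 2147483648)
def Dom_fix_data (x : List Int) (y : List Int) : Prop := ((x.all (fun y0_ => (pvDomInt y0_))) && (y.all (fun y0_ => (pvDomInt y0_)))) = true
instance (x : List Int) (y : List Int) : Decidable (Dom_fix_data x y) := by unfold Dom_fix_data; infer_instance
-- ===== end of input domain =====

-- B builds the result declaratively from slices (duplicate each later x / each non-final y)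
-- instead of A's index loop with a last-iteration branch; same O(n) cost (objective: alternative).


-- ===== PORT A =====
-- A's loop body as a fold step (the for-loop over range(len(x)))
def fixStepA (x : List Int) (y : List Int) (st : List Int × List Int) (i : Int) : List Int × List Int :=
  let nx := st.1 ++ [PySem.List.pyGetD x i 0]
  let ny := st.2 ++ [PySem.List.pyGetD y i 0]
  if i ≠ (x.length : Int) - 1 then
    (nx ++ [PySem.List.pyGetD x (i + 1) 0], ny ++ [PySem.List.pyGetD y i 0])
  else
    (nx, ny)

def fix_data (x : List Int) (y : List Int) : List Int × List Int :=
  (PySem.List.pyRange 0 (x.length : Int) 1).foldl (fixStepA x y) ([], [])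

-- ===== PORT B =====
-- Source B's _doubled: the comprehension [v for u in vals for v in (u, u)]
def pvDoubled (vals : List Int) : List Int := vals.flatMap (fun u => [u, u])

def fix_data_alt (x : List Int) (y : List Int) : List Int × List Int :=
  let n : Int := (x.length : Int)
  if n = 0 then ([], [])
  else
    (PySem.List.slice x none (some 1) ++ pvDoubled (PySem.List.slice x (some 1) none),
     pvDoubled (PySem.List.slice y none (some (n - 1))) ++ [PySem.List.pyGetD y (n - 1) 0])

-- ===== PRECONDITION & SPEC =====
-- Pre_ excludes exactly the inputs where A raises IndexError (y shorter than x); B raises there too.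
def Pre_fix_data (x : List Int) (y : List Int) : Prop := x.length ≤ y.length
instance (x : List Int) (y : List Int) : Decidable (Pre_fix_data x y) := by unfold Pre_fix_data; infer_instance
def pvWitness_fix_data : List Int × List Int := ([1, 2, 3], [4, 5, 6])

def Spec_fix_data (x : List Int) (y : List Int) (out : List Int × List Int) : Prop := out = fix_data_alt x y
instance (x : List Int) (y : List Int) (out : List Int × List Int) : Decidable (Spec_fix_data x y out) := by unfold Spec_fix_data; infer_instance

-- ===== CLAIM (what is proved, stated in full; the proofs are below) =====
def Claim_equal_fix_data : Prop := ∀ (x : List Int) (y : List Int), Dom_fix_data x y → Pre_fix_data x y → Spec_fix_data x y (fix_data x y)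

-- ===== LEMMAS AND PROOFS =====

theorem pvDoubled_append (l m : List Int) : pvDoubled (l ++ m) = pvDoubled l ++ pvDoubled m := by
  simp [pvDoubled]

-- invariant for A's loop: after k < len x steps,
-- fst with one more x[k] is the doubled prefix of x minus its head, snd is the doubled prefix of y
theorem fix_invariant (x y : List Int) (hxy : x.length ≤ y.length) (k : Nat) (hk : k < x.length) :
    ((PySem.List.pyRange 0 (k : Int) 1).foldl (fixStepA x y) ([], [])).1 ++ [x.getD k 0]
      = (pvDoubled (x.take (k + 1))).tail
    ∧ ((PySem.List.pyRange 0 (k : Int) 1).foldl (fixStepA x y) ([], [])).2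
      = pvDoubled (y.take k) := by
  induction k with
  | zero =>
    cases x with
    | nil => simp at hk
    | cons a xs => simp [pvDoubled]
  | succ k ih =>
    have hk' : k < x.length := by omega
    obtain ⟨ih1, ih2⟩ := ih hk'
    have hr : PySem.List.pyRange 0 ((k : Int) + 1) 1
        = PySem.List.pyRange 0 (k : Int) 1 ++ [(k : Int)] := by
      simpa using PySem.List.pyRange_one_succ_right (a := 0) (b := (k : Int)) (by positivity)
    have hne : (k : Int) ≠ (x.length : Int) - 1 := by omega
    have hky : k < y.length := by omega
    have htx : x.take (k + 2) = x.take (k + 1) ++ [x[k + 1]] := by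
      rw [List.take_add_one, List.getElem?_eq_getElem hk]
      rfl
    have hty : y.take (k + 1) = y.take k ++ [y[k]] := by
      rw [List.take_add_one, List.getElem?_eq_getElem hky]
      rfl
    have hnonempty : pvDoubled (x.take (k + 1)) ≠ [] := by
      have : x.take (k + 1) ≠ [] := by
        cases x with
        | nil => simp at hk
        | cons a xs => simp
      cases h : x.take (k + 1) with
      | nil => exact absurd h this
      | cons a l => simp [pvDoubled]
    push_cast
    rw [hr, List.foldl_append]
    simp only [List.foldl_cons, List.foldl_nil]
    constructor
    · have : x.getD (k + 1) 0 = x[k + 1] := List.getD_eq_getElem x 0 hk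
      rw [htx, pvDoubled_append, List.tail_append_of_ne_nil hnonempty]
      simp only [fixStepA, if_pos (by exact hne)]
      simp only [PySem.List.pyGetD_natCast]
      rw [← ih1]
      have hx1 : x.getD k 0 = x[k] := List.getD_eq_getElem x 0 hk'
      have hx2 : x.getD (k + 1) 0 = x[k + 1] := List.getD_eq_getElem x 0 hk
      -- rewrite (↑k + 1) index as ↑(k+1)
      have hcast : ((k : Int) + 1) = ((k + 1 : Nat) : Int) := by push_cast; ring
      rw [hcast, PySem.List.pyGetD_natCast]
      simp [pvDoubled, List.getElem?_eq_getElem hk]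
    · simp only [fixStepA, if_pos (by exact hne)]
      simp only [PySem.List.pyGetD_natCast]
      rw [hty, pvDoubled_append, ← ih2]
      simp [pvDoubled, List.getElem?_eq_getElem hky]

-- doubled list minus its head = head once, then the doubled tail
theorem pvDoubled_tail (a : Int) (xs : List Int) :
    (pvDoubled (a :: xs)).tail = a :: pvDoubled xs := by
  simp [pvDoubled]

-- ===== VERDICT (by name: the statement is the Claim_ definition above) =====
theorem fix_data_spec : Claim_equal_fix_data := by
  intro x y _ hpre
  unfold Spec_fix_data fix_data fix_data_alt
  by_cases hx : x = []
  · simp [hx]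
  · have hlen : 1 ≤ x.length := List.length_pos_iff.mpr hx
    simp only [show ((x.length : Int) ≠ 0) from by omega, ite_false]
    obtain ⟨n, hn⟩ : ∃ n : Nat, x.length = n + 1 := ⟨x.length - 1, by omega⟩
    have hinv := fix_invariant x y hpre n (by omega)
    obtain ⟨h1, h2⟩ := hinv
    have hr : PySem.List.pyRange 0 (x.length : Int) 1
        = PySem.List.pyRange 0 (n : Int) 1 ++ [(n : Int)] := by
      rw [hn]; push_cast
      simpa using PySem.List.pyRange_one_succ_right (a := 0) (b := (n : Int)) (by positivity)
    have hlast : ((x.length : Int) - 1) = (n : Int) := by rw [hn]; push_cast; ring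
    rw [hr, List.foldl_append]
    simp only [List.foldl_cons, List.foldl_nil]
    simp only [fixStepA, hlast, ne_eq, not_true_eq_false, ite_false]
    have htake : x.take (n + 1) = x := by rw [← hn, List.take_length]
    rw [htake] at h1
    have hsl1 : PySem.List.slice x none (some 1) = x.take 1 := by
      simpa using PySem.List.slice_to_natCast (xs := x) (b := 1)
    have hsl2 : PySem.List.slice x (some 1) none = x.drop 1 := by
      simpa using PySem.List.slice_from_natCast (xs := x) (a := 1)
    have hsly : PySem.List.slice y none (some ((n : Nat) : Int)) = y.take n :=
      PySem.List.slice_to_natCast y n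
    refine Prod.ext ?_ ?_
    · show ((PySem.List.pyRange 0 (n : Int) 1).foldl (fixStepA x y) ([], [])).1
          ++ [PySem.List.pyGetD x (n : Int) 0] = _
      rw [PySem.List.pyGetD_natCast, h1, hsl1, hsl2]
      cases x with
      | nil => exact absurd rfl hx
      | cons a xs => simp [pvDoubled_tail]
    · show ((PySem.List.pyRange 0 (n : Int) 1).foldl (fixStepA x y) ([], [])).2
          ++ [PySem.List.pyGetD y (n : Int) 0] = _
      rw [h2, hsly]
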